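-- pv_equiv track=rewrite | github.com/jsjEDC/Rosoka-SDK-Python-API-Code | rosoka.py | pad_counter
-- ===== SOURCE A (Python) =====
-- def pad_counter(count, max):
--     # count and max are integers. If passed (2,99), should "pad" the 2 with a leading 0 .. ala 2 ==> "02"
--     maxStr       = str(max)
--     maxStrLen    = len(maxStr)
--     countStr     = str(count)
--     tempCountStr = countStr
--     tempCountLen = len(tempCountStr)
--
--     if (tempCountLen >= maxStrLen):
--         # do nothing
--         return tempCountStr
--     elif (tempCountLen < maxStrLen):
--         while (tempCountLen < maxStrLen):
--             tempCountStr = "0" + tempCountStr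
--             tempCountLen = len(tempCountStr)
--         return tempCountStr
-- ===== SOURCE B (Python) =====
-- def pad_counter(count, max):
--     countStr = str(count)
--     pad = len(str(max)) - len(countStr)
--     if pad <= 0:
--         return countStr
--     return "0" * pad + countStr
-- ===== Notes on version B (the rewrite author's own statement) =====
-- stated objective: simpler
-- what changed: Replaces the character-at-a-time while loop (which recomputes the length each iteration) with a single closed-form pad count and one string multiplication, prepended before the whole str(count) including a minus sign.
import Mathlib
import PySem

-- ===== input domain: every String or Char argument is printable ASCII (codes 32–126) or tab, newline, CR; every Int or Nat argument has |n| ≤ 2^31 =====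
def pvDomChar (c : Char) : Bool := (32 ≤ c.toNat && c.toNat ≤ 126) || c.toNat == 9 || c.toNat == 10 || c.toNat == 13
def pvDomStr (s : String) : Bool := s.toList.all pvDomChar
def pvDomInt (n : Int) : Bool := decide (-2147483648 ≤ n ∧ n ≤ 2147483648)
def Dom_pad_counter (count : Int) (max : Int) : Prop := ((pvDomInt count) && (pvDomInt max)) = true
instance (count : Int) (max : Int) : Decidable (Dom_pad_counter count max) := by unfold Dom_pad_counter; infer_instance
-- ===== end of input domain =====

-- B replaces A's one-character-at-a-time padding loop with a closed-form pad count
-- and one string repetition (objective: simpler).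

-- ===== PORT A =====
-- A's while loop: prepend '0' and recompute the length until it reaches maxLen.
def padA_loop (maxLen : Nat) (s : List Char) : List Char :=
  if s.length < maxLen then padA_loop maxLen ('0' :: s) else s
termination_by maxLen - s.length

def pad_counter (count : Int) (max : Int) : String :=
  let maxStr := PySem.Int.toChars max
  let maxStrLen := maxStr.length
  let tempCountStr := PySem.Int.toChars count
  let tempCountLen := tempCountStr.length
  if tempCountLen ≥ maxStrLen then String.ofList tempCountStr
  else String.ofList (padA_loop maxStrLen tempCountStr)

-- ===== PORT B =====
def pad_counter_alt (count : Int) (max : Int) : String :=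
  let countStr := PySem.Int.toChars count
  let pad : Int := (PySem.Int.toChars max).length - countStr.length
  if pad ≤ 0 then String.ofList countStr
  else String.ofList (PySem.List.pyRepeat ['0'] pad ++ countStr)

-- ===== PRECONDITION & SPEC =====
def Spec_pad_counter (count : Int) (max : Int) (out : String) : Prop := out = pad_counter_alt count max
instance (count : Int) (max : Int) (out : String) : Decidable (Spec_pad_counter count max out) := by unfold Spec_pad_counter; infer_instance

-- ===== CLAIM (what is proved, stated in full; the proofs are below) =====
def Claim_equal_pad_counter : Prop := ∀ (count : Int) (max : Int), Dom_pad_counter count max → Spec_pad_counter count max (pad_counter count max)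

-- ===== LEMMAS AND PROOFS =====
theorem padA_loop_eq (maxLen : Nat) : ∀ (n : Nat) (s : List Char), maxLen - s.length = n →
    padA_loop maxLen s = List.replicate n '0' ++ s := by
  intro n
  induction n with
  | zero =>
    intro s h
    unfold padA_loop
    rw [if_neg (by omega)]
    simp
  | succ k ih =>
    intro s h
    unfold padA_loop
    rw [if_pos (by omega)]
    rw [ih ('0' :: s) (by simp; omega)]
    rw [List.replicate_succ']
    simp

-- ===== VERDICT (by name: the statement is the Claim_ definition above) =====
theorem pad_counter_spec : Claim_equal_pad_counter := by
  intro count max _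
  unfold Spec_pad_counter pad_counter pad_counter_alt
  simp only []
  set c := PySem.Int.toChars count with hc
  set m := (PySem.Int.toChars max).length with hm
  by_cases h : c.length ≥ m
  · rw [if_pos h, if_pos (by omega)]
  · rw [if_neg h, if_neg (by omega)]
    rw [padA_loop_eq m (m - c.length) c rfl]
    rw [PySem.List.pyRepeat_singleton]
    have hn : ((m : Int) - (c.length : Int)).toNat = m - c.length := by omega
    rw [hn]
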